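-- pv_equiv track=rewrite | github.com/Dirt-Craft/LibrarianLib | unifont/fixing/atlas2hex.py | glyph_width
-- ===== SOURCE A (Python) =====
-- def glyph_width(i, glyph):
--     width = 0
--
--     # Initialize selected code points for double width (16x16).
--     # Double-width is forced in cases where a glyph (usually a combining
--     # glyph) only occupies the left-hand side of a 16x16 grid, but must
--     # be rendered as double-width to appear properly with other glyphs
--     # in a given script.  If additions were made to a script after
--     # Unicode 5.0, the Unicode version is given in parentheses after
--     # the script name.
--     if 0x0700 <= i <= 0x074F: width = 16 # Syriac
--     if 0x0800 <= i <= 0x083F: width = 16 # Samaritan (5.2)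
--     if 0x0900 <= i <= 0x0DFF: width = 16 # Indic
--     if 0x1000 <= i <= 0x109F: width = 16 # Myanmar
--     if 0x1100 <= i <= 0x11FF: width = 16 # Hangul Jamo
--     if 0x1400 <= i <= 0x167F: width = 16 # Canadian Aboriginal
--     if 0x1700 <= i <= 0x171F: width = 16 # Tagalog
--     if 0x1720 <= i <= 0x173F: width = 16 # Hanunoo
--     if 0x1740 <= i <= 0x175F: width = 16 # Buhid
--     if 0x1760 <= i <= 0x177F: width = 16 # Tagbanwa
--     if 0x1780 <= i <= 0x17FF: width = 16 # Khmer
--     if 0x18B0 <= i <= 0x18FF: width = 16 # Ext. Can. Aboriginal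
--     if 0x1800 <= i <= 0x18AF: width = 16 # Mongolian
--     if 0x1900 <= i <= 0x194F: width = 16 # Limbu
--     # if i >= 0x1980 and i <= 0x19DF: width = 16 # New Tai Lue
--     if 0x1A00 <= i <= 0x1A1F: width = 16 # Buginese
--     if 0x1A20 <= i <= 0x1AAF: width = 16 # Tai Tham (5.2)
--     if 0x1B00 <= i <= 0x1B7F: width = 16 # Balinese
--     if 0x1B80 <= i <= 0x1BBF: width = 16 # Sundanese (5.1)
--     if 0x1BC0 <= i <= 0x1BFF: width = 16 # Batak (6.0)
--     if 0x1C00 <= i <= 0x1C4F: width = 16 # Lepcha (5.1)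
--     if 0x1CC0 <= i <= 0x1CCF: width = 16 # Sundanese Supplement
--     if 0x1CD0 <= i <= 0x1CFF: width = 16 # Vedic Extensions (5.2)
--     if i == 0x2329 or  i == 0x232A: width = 16 # Left- & Right-pointing Angle Brackets
--     if 0x2E80 <= i <= 0xA4CF: width = 16 # CJK
--     # if i >= 0x9FD8 and i <= 0x9FE9: width = 32 # CJK quadruple-width
--     if 0xA900 <= i <= 0xA92F: width = 16 # Kayah Li (5.1)
--     if 0xA930 <= i <= 0xA95F: width = 16 # Rejang (5.1)
--     if 0xA960 <= i <= 0xA97F: width = 16 # Hangul Jamo Extended-A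
--     if 0xA980 <= i <= 0xA9DF: width = 16 # Javanese (5.2)
--     if 0xAA00 <= i <= 0xAA5F: width = 16 # Cham (5.1)
--     if 0xA9E0 <= i <= 0xA9FF: width = 16 # Myanmar Extended-B
--     if 0xAA00 <= i <= 0xAA5F: width = 16 # Cham
--     if 0xAA60 <= i <= 0xAA7F: width = 16 # Myanmar Extended-A
--     if 0xAAE0 <= i <= 0xAAFF: width = 16 # Meetei Mayek Ext (6.0)
--     if 0xABC0 <= i <= 0xABFF: width = 16 # Meetei Mayek (5.2)
--     if 0xAC00 <= i <= 0xD7AF: width = 16 # Hangul Syllables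
--     if 0xD7B0 <= i <= 0xD7FF: width = 16 # Hangul Jamo Extended-B
--     if 0xF900 <= i <= 0xFAFF: width = 16 # CJK Compatibility
--     if 0xFE10 <= i <= 0xFE1F: width = 16 # Vertical Forms
--     if 0xFE30 <= i <= 0xFE60: width = 16 # CJK Compatibility Forms
--     if 0xFFE0 <= i <= 0xFFE6: width = 16 # CJK Compatibility Forms
--
--     if i == 0x303F: width = 0 # CJK half-space fill
--
--     if width != 0:
--         return width
--
--     for i in range(16):
--         if glyph[i] & 0xFF != 0:
--             return 16
--     return 8
-- ===== SOURCE B (Python) =====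
-- # Double-width lookup by crossing parity: the original ~40 overlapping ranges are
-- # pre-merged into 20 disjoint intervals (with the CJK half-space fill 0x303F carved
-- # out), stored as one flat sorted boundary list; i is double-width iff an odd number
-- # of boundaries lie at or below it.  The bitmap test is a slice + any().
-- BOUNDS = [
--     0x0700, 0x0750, 0x0800, 0x0840, 0x0900, 0x0E00, 0x1000, 0x10A0,
--     0x1100, 0x1200, 0x1400, 0x1680, 0x1700, 0x1950, 0x1A00, 0x1AB0,
--     0x1B00, 0x1C50, 0x1CC0, 0x1D00, 0x2329, 0x232B, 0x2E80, 0x303F,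
--     0x3040, 0xA4D0, 0xA900, 0xAA80, 0xAAE0, 0xAB00, 0xABC0, 0xD800,
--     0xF900, 0xFB00, 0xFE10, 0xFE20, 0xFE30, 0xFE61, 0xFFE0, 0xFFE7,
-- ]
--
--
-- def glyph_width(i, glyph):
--     if sum(b <= i for b in BOUNDS) % 2:
--         return 16
--     return 16 if any(v & 0xFF for v in glyph[:16]) else 8
-- ===== Notes on version B (the rewrite author's own statement) =====
-- stated objective: alternative
-- what changed: A's ~40 sequential last-wins range ifs plus the 0x303F special case are replaced by a flat sorted boundary list of 20 pre-merged disjoint intervals (0x303F carved out) queried by crossing parity (odd count of boundaries <= i), and the indexed 16-iteration bitmap loop becomes a slice + any().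
import Mathlib
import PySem

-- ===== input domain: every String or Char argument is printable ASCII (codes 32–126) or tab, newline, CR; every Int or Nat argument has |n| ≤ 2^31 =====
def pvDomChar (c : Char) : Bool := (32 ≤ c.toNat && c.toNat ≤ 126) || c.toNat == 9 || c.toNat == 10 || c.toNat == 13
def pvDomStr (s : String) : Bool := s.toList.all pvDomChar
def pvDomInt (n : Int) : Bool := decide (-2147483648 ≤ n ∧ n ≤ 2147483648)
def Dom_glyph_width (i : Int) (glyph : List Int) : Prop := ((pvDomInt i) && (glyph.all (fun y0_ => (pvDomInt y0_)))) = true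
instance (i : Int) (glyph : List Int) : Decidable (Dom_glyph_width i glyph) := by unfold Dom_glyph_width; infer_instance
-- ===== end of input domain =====

-- B replaces A's ~40 last-wins range ifs and the 0x303F special case by crossing
-- parity over one sorted boundary list of pre-merged disjoint intervals, and the
-- indexed bitmap loop by a slice + any (objective: alternative).

-- ===== PORT A =====
-- A's final loop `for i in range(16): if glyph[i] & 0xFF != 0: return 16`;
-- `none` from pyGet? is Python's IndexError (excluded by Pre_); the port returns 8 there.
def scanA (glyph : List Int) : List Int → Int
  | [] => 8
  | k :: ks =>
    match PySem.List.pyGet? glyph k with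
    | none => 8
    | some b => if PySem.Int.band b 0xFF ≠ 0 then 16 else scanA glyph ks

-- A's chain of last-wins `if … : width = 16` assignments, line for line.
def widthA (i : Int) : Int :=
  let width : Int := 0
  let width := if 0x0700 ≤ i ∧ i ≤ 0x074F then (16:Int) else width -- Syriac
  let width := if 0x0800 ≤ i ∧ i ≤ 0x083F then (16:Int) else width -- Samaritan
  let width := if 0x0900 ≤ i ∧ i ≤ 0x0DFF then (16:Int) else width -- Indic
  let width := if 0x1000 ≤ i ∧ i ≤ 0x109F then (16:Int) else width -- Myanmar
  let width := if 0x1100 ≤ i ∧ i ≤ 0x11FF then (16:Int) else width -- Hangul Jamo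
  let width := if 0x1400 ≤ i ∧ i ≤ 0x167F then (16:Int) else width -- Canadian Aboriginal
  let width := if 0x1700 ≤ i ∧ i ≤ 0x171F then (16:Int) else width -- Tagalog
  let width := if 0x1720 ≤ i ∧ i ≤ 0x173F then (16:Int) else width -- Hanunoo
  let width := if 0x1740 ≤ i ∧ i ≤ 0x175F then (16:Int) else width -- Buhid
  let width := if 0x1760 ≤ i ∧ i ≤ 0x177F then (16:Int) else width -- Tagbanwa
  let width := if 0x1780 ≤ i ∧ i ≤ 0x17FF then (16:Int) else width -- Khmer
  let width := if 0x18B0 ≤ i ∧ i ≤ 0x18FF then (16:Int) else width -- Ext. Can. Aboriginal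
  let width := if 0x1800 ≤ i ∧ i ≤ 0x18AF then (16:Int) else width -- Mongolian
  let width := if 0x1900 ≤ i ∧ i ≤ 0x194F then (16:Int) else width -- Limbu
  let width := if 0x1A00 ≤ i ∧ i ≤ 0x1A1F then (16:Int) else width -- Buginese
  let width := if 0x1A20 ≤ i ∧ i ≤ 0x1AAF then (16:Int) else width -- Tai Tham
  let width := if 0x1B00 ≤ i ∧ i ≤ 0x1B7F then (16:Int) else width -- Balinese
  let width := if 0x1B80 ≤ i ∧ i ≤ 0x1BBF then (16:Int) else width -- Sundanese
  let width := if 0x1BC0 ≤ i ∧ i ≤ 0x1BFF then (16:Int) else width -- Batak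
  let width := if 0x1C00 ≤ i ∧ i ≤ 0x1C4F then (16:Int) else width -- Lepcha
  let width := if 0x1CC0 ≤ i ∧ i ≤ 0x1CCF then (16:Int) else width -- Sundanese Supplement
  let width := if 0x1CD0 ≤ i ∧ i ≤ 0x1CFF then (16:Int) else width -- Vedic Extensions
  let width := if i = 0x2329 ∨ i = 0x232A then (16:Int) else width -- Angle Brackets
  let width := if 0x2E80 ≤ i ∧ i ≤ 0xA4CF then (16:Int) else width -- CJK
  let width := if 0xA900 ≤ i ∧ i ≤ 0xA92F then (16:Int) else width -- Kayah Li
  let width := if 0xA930 ≤ i ∧ i ≤ 0xA95F then (16:Int) else width -- Rejang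
  let width := if 0xA960 ≤ i ∧ i ≤ 0xA97F then (16:Int) else width -- Hangul Jamo Extended-A
  let width := if 0xA980 ≤ i ∧ i ≤ 0xA9DF then (16:Int) else width -- Javanese
  let width := if 0xAA00 ≤ i ∧ i ≤ 0xAA5F then (16:Int) else width -- Cham
  let width := if 0xA9E0 ≤ i ∧ i ≤ 0xA9FF then (16:Int) else width -- Myanmar Extended-B
  let width := if 0xAA00 ≤ i ∧ i ≤ 0xAA5F then (16:Int) else width -- Cham (duplicate in A)
  let width := if 0xAA60 ≤ i ∧ i ≤ 0xAA7F then (16:Int) else width -- Myanmar Extended-A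
  let width := if 0xAAE0 ≤ i ∧ i ≤ 0xAAFF then (16:Int) else width -- Meetei Mayek Ext
  let width := if 0xABC0 ≤ i ∧ i ≤ 0xABFF then (16:Int) else width -- Meetei Mayek
  let width := if 0xAC00 ≤ i ∧ i ≤ 0xD7AF then (16:Int) else width -- Hangul Syllables
  let width := if 0xD7B0 ≤ i ∧ i ≤ 0xD7FF then (16:Int) else width -- Hangul Jamo Extended-B
  let width := if 0xF900 ≤ i ∧ i ≤ 0xFAFF then (16:Int) else width -- CJK Compatibility
  let width := if 0xFE10 ≤ i ∧ i ≤ 0xFE1F then (16:Int) else width -- Vertical Forms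
  let width := if 0xFE30 ≤ i ∧ i ≤ 0xFE60 then (16:Int) else width -- CJK Compatibility Forms
  let width := if 0xFFE0 ≤ i ∧ i ≤ 0xFFE6 then (16:Int) else width -- CJK Compatibility Forms
  let width := if i = 0x303F then (0:Int) else width               -- CJK half-space fill
  width

def glyph_width (i : Int) (glyph : List Int) : Int :=
  if widthA i ≠ 0 then widthA i
  else scanA glyph (PySem.List.pyRange 0 16 1)

-- ===== PORT B =====
-- Sorted boundary list of the 20 merged disjoint double-width intervals (0x303F carved out).
def BOUNDS : List Int :=
  [0x0700, 0x0750, 0x0800, 0x0840, 0x0900, 0x0E00, 0x1000, 0x10A0,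
   0x1100, 0x1200, 0x1400, 0x1680, 0x1700, 0x1950, 0x1A00, 0x1AB0,
   0x1B00, 0x1C50, 0x1CC0, 0x1D00, 0x2329, 0x232B, 0x2E80, 0x303F,
   0x3040, 0xA4D0, 0xA900, 0xAA80, 0xAAE0, 0xAB00, 0xABC0, 0xD800,
   0xF900, 0xFB00, 0xFE10, 0xFE20, 0xFE30, 0xFE61, 0xFFE0, 0xFFE7]

-- `sum(b <= i for b in BOUNDS)` (a sum of booleans) is List.countP; glyph[:16] is slice.
def glyph_width_alt (i : Int) (glyph : List Int) : Int :=
  if (BOUNDS.countP (fun b => decide (b ≤ i))) % 2 = 1 then 16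
  else if (PySem.List.slice glyph none (some 16)).any
            (fun v => decide (PySem.Int.band v 0xFF ≠ 0)) = true then 16 else 8

-- ===== PRECONDITION & SPEC =====
-- Pre_ excludes exactly the inputs on which the Python A raises IndexError: code point
-- not forced double-width and a bitmap with fewer than 16 entries all ≡ 0 mod 256.
def Pre_glyph_width (i : Int) (glyph : List Int) : Prop :=
  (BOUNDS.countP (fun b => decide (b ≤ i))) % 2 = 1
  ∨ 16 ≤ glyph.length
  ∨ glyph.any (fun v => decide (PySem.Int.band v 0xFF ≠ 0)) = true
instance (i : Int) (glyph : List Int) : Decidable (Pre_glyph_width i glyph) := by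
  unfold Pre_glyph_width; infer_instance

def pvWitness_glyph_width : Int × List Int := (0x1100, [])

def Spec_glyph_width (i : Int) (glyph : List Int) (out : Int) : Prop := out = glyph_width_alt i glyph
instance (i : Int) (glyph : List Int) (out : Int) : Decidable (Spec_glyph_width i glyph out) := by unfold Spec_glyph_width; infer_instance

-- ===== CLAIM (what is proved, stated in full; the proofs are below) =====
def Claim_equal_glyph_width : Prop := ∀ (i : Int) (glyph : List Int), Dom_glyph_width i glyph → Pre_glyph_width i glyph → Spec_glyph_width i glyph (glyph_width i glyph)

-- ===== LEMMAS AND PROOFS =====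

-- the 20 merged disjoint half-open intervals behind BOUNDS, as (lo, hi+1) pairs
def PAIRS : List (Int × Int) :=
  [(0x0700, 0x0750), (0x0800, 0x0840), (0x0900, 0x0E00), (0x1000, 0x10A0),
   (0x1100, 0x1200), (0x1400, 0x1680), (0x1700, 0x1950), (0x1A00, 0x1AB0),
   (0x1B00, 0x1C50), (0x1CC0, 0x1D00), (0x2329, 0x232B), (0x2E80, 0x303F),
   (0x3040, 0xA4D0), (0xA900, 0xAA80), (0xAAE0, 0xAB00), (0xABC0, 0xD800),
   (0xF900, 0xFB00), (0xFE10, 0xFE20), (0xFE30, 0xFE61), (0xFFE0, 0xFFE7)]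

-- "the half-open interval p contains i"
def cont (i : Int) (p : Int × Int) : Bool := decide (p.1 ≤ i) && decide (i < p.2)

-- collapse A's last-wins assignment chain into one condition
theorem step_or (c p : Prop) [Decidable c] [Decidable p] :
    (if c then (16:Int) else if p then 16 else 0) = if c ∨ p then 16 else 0 := by
  by_cases hc : c <;> by_cases hp : p <;> simp [hc, hp]

theorem step_last (c p : Prop) [Decidable c] [Decidable p] :
    (if c then (0:Int) else if p then 16 else 0) = if ¬c ∧ p then 16 else 0 := by
  by_cases hc : c <;> by_cases hp : p <;> simp [hc, hp]

set_option maxHeartbeats 2000000 in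
theorem widthA_eq (i : Int) :
    widthA i = if PAIRS.any (cont i) = true then 16 else 0 := by
  simp only [widthA]
  repeat rw [step_or]
  rw [step_last]
  have h : (¬i = 0x303F ∧
      (0xFFE0 ≤ i ∧ i ≤ 0xFFE6 ∨ 0xFE30 ≤ i ∧ i ≤ 0xFE60 ∨ 0xFE10 ≤ i ∧ i ≤ 0xFE1F ∨
       0xF900 ≤ i ∧ i ≤ 0xFAFF ∨ 0xD7B0 ≤ i ∧ i ≤ 0xD7FF ∨ 0xAC00 ≤ i ∧ i ≤ 0xD7AF ∨
       0xABC0 ≤ i ∧ i ≤ 0xABFF ∨ 0xAAE0 ≤ i ∧ i ≤ 0xAAFF ∨ 0xAA60 ≤ i ∧ i ≤ 0xAA7F ∨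
       0xAA00 ≤ i ∧ i ≤ 0xAA5F ∨ 0xA9E0 ≤ i ∧ i ≤ 0xA9FF ∨ 0xAA00 ≤ i ∧ i ≤ 0xAA5F ∨
       0xA980 ≤ i ∧ i ≤ 0xA9DF ∨ 0xA960 ≤ i ∧ i ≤ 0xA97F ∨ 0xA930 ≤ i ∧ i ≤ 0xA95F ∨
       0xA900 ≤ i ∧ i ≤ 0xA92F ∨ 0x2E80 ≤ i ∧ i ≤ 0xA4CF ∨ (i = 0x2329 ∨ i = 0x232A) ∨
       0x1CD0 ≤ i ∧ i ≤ 0x1CFF ∨ 0x1CC0 ≤ i ∧ i ≤ 0x1CCF ∨ 0x1C00 ≤ i ∧ i ≤ 0x1C4F ∨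
       0x1BC0 ≤ i ∧ i ≤ 0x1BFF ∨ 0x1B80 ≤ i ∧ i ≤ 0x1BBF ∨ 0x1B00 ≤ i ∧ i ≤ 0x1B7F ∨
       0x1A20 ≤ i ∧ i ≤ 0x1AAF ∨ 0x1A00 ≤ i ∧ i ≤ 0x1A1F ∨ 0x1900 ≤ i ∧ i ≤ 0x194F ∨
       0x1800 ≤ i ∧ i ≤ 0x18AF ∨ 0x18B0 ≤ i ∧ i ≤ 0x18FF ∨ 0x1780 ≤ i ∧ i ≤ 0x17FF ∨
       0x1760 ≤ i ∧ i ≤ 0x177F ∨ 0x1740 ≤ i ∧ i ≤ 0x175F ∨ 0x1720 ≤ i ∧ i ≤ 0x173F ∨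
       0x1700 ≤ i ∧ i ≤ 0x171F ∨ 0x1400 ≤ i ∧ i ≤ 0x167F ∨ 0x1100 ≤ i ∧ i ≤ 0x11FF ∨
       0x1000 ≤ i ∧ i ≤ 0x109F ∨ 0x0900 ≤ i ∧ i ≤ 0x0DFF ∨ 0x0800 ≤ i ∧ i ≤ 0x083F ∨
       0x0700 ≤ i ∧ i ≤ 0x074F))
      ↔ (PAIRS.any (cont i) = true) := by
    simp only [PAIRS, cont, List.any_cons, List.any_nil, Bool.or_false, Bool.or_eq_true,
      Bool.and_eq_true, decide_eq_true_eq]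
    omega
  simp only [h]

-- mod-2 bridge: counting boundaries ≤ i over the flattened pairs is, mod 2,
-- counting the pairs whose interval contains i
theorem countP_flat (i : Int) :
    ∀ ps : List (Int × Int), (∀ p ∈ ps, p.1 ≤ p.2) →
      ((ps.flatMap fun p => [p.1, p.2]).countP (fun b => decide (b ≤ i))) % 2
        = (ps.countP (cont i)) % 2 := by
  intro ps
  induction ps with
  | nil => intro _; rfl
  | cons p ps ih =>
    intro h
    have hp : p.1 ≤ p.2 := h p (by simp)
    have ih' := ih (fun q hq => h q (by simp [hq]))
    simp only [List.flatMap_cons, List.cons_append, List.nil_append, List.countP_cons, cont]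
    split_ifs at * <;>
      simp only [Bool.and_eq_true, decide_eq_true_eq, not_and, not_le, not_lt] at * <;>
      omega

-- with disjoint intervals, odd count ↔ some interval contains i
theorem parity_any (i : Int) :
    ∀ ps : List (Int × Int), List.Pairwise (fun p q : Int × Int => p.2 ≤ q.1) ps →
      ((ps.countP (cont i)) % 2 = 1 ↔ ps.any (cont i) = true) := by
  intro ps
  induction ps with
  | nil => intro _; simp
  | cons p ps ih =>
    intro h
    rcases List.pairwise_cons.mp h with ⟨hd, ht⟩
    rw [List.countP_cons, List.any_cons]
    by_cases hc : cont i p = true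
    · have hz : ps.countP (cont i) = 0 := by
        refine List.countP_eq_zero.mpr ?_
        intro q hq
        have hq2 := hd q hq
        simp only [cont, Bool.and_eq_true, decide_eq_true_eq] at hc ⊢
        omega
      rw [hz, if_pos hc, hc]
      simp
    · have hcf : cont i p = false := by
        cases hcc : cont i p
        · rfl
        · exact absurd hcc hc
      rw [if_neg hc, Nat.add_zero, ih ht, hcf]
      simp

theorem dw_iff (i : Int) :
    ((BOUNDS.countP (fun b => decide (b ≤ i))) % 2 = 1) ↔ PAIRS.any (cont i) = true := by
  have hflat : BOUNDS = PAIRS.flatMap fun p => [p.1, p.2] := by decide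
  rw [hflat, countP_flat i PAIRS (by decide)]
  exact parity_any i PAIRS (by decide)

set_option maxRecDepth 8192 in
theorem scanA_scan (glyph : List Int) :
    ∀ (n j : Nat), j + n = 16 →
      (16 ≤ glyph.length
        ∨ (glyph.drop j).any (fun v => decide (PySem.Int.band v 0xFF ≠ 0)) = true) →
      scanA glyph (PySem.List.pyRange (j : Int) 16 1)
        = if ((glyph.drop j).take n).any (fun v => decide (PySem.Int.band v 0xFF ≠ 0)) = true
          then 16 else 8 := by
  intro n
  induction n with
  | zero =>
    intro j hj _
    have h16 : j = 16 := by omega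
    subst h16
    have hr : PySem.List.pyRange (16 : Int) 16 1 = [] := by decide
    simp [hr, scanA]
  | succ n ih =>
    intro j hj hpre
    rw [PySem.List.pyRange_one_cons (by omega : (j : Int) < 16)]
    by_cases hjl : j < glyph.length
    · have hget : PySem.List.pyGet? glyph (j : Int) = some glyph[j] := by
        rw [PySem.List.pyGet?_natCast]
        exact List.getElem?_eq_getElem hjl
      have hdrop : glyph.drop j = glyph[j] :: glyph.drop (j + 1) :=
        List.drop_eq_getElem_cons hjl
      simp only [scanA, hget]
      by_cases hnz : PySem.Int.band glyph[j] 0xFF ≠ 0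
      · rw [if_pos hnz, hdrop, List.take_succ_cons, List.any_cons,
          decide_eq_true hnz, Bool.true_or, if_pos rfl]
      · rw [if_neg hnz]
        have hpre' : 16 ≤ glyph.length
            ∨ (glyph.drop (j + 1)).any (fun v => decide (PySem.Int.band v 0xFF ≠ 0)) = true := by
          rcases hpre with hlen | hany
          · exact Or.inl hlen
          · right
            rw [hdrop, List.any_cons] at hany
            by_cases h' : PySem.Int.band glyph[j] 0xFF ≠ 0
            · exact absurd h' hnz
            · simpa [decide_eq_false h'] using hany
        have hcast : ((j : Int) + 1) = ((j + 1 : Nat) : Int) := by push_cast; ring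
        rw [hcast, ih (j + 1) (by omega) hpre']
        rw [hdrop, List.take_succ_cons, List.any_cons, decide_eq_false hnz, Bool.false_or]
    · have hget : PySem.List.pyGet? glyph (j : Int) = none := by
        rw [PySem.List.pyGet?_natCast]
        exact List.getElem?_eq_none (by omega)
      have hdrop : glyph.drop j = [] := List.drop_eq_nil_of_le (by omega)
      simp [scanA, hget, hdrop]

-- ===== VERDICT (by name: the statement is the Claim_ definition above) =====
theorem glyph_width_spec : Claim_equal_glyph_width := by
  intro i glyph _ hpre
  unfold Spec_glyph_width glyph_width glyph_width_alt
  rw [widthA_eq]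
  by_cases hdw : PAIRS.any (cont i) = true
  · rw [if_pos hdw, if_pos (by norm_num : (16:Int) ≠ 0), if_pos ((dw_iff i).mpr hdw)]
  · rw [if_neg hdw, if_neg (by norm_num : ¬ (0:Int) ≠ 0)]
    have hcnt : ¬ (BOUNDS.countP (fun b => decide (b ≤ i))) % 2 = 1 :=
      fun hx => hdw ((dw_iff i).mp hx)
    rw [if_neg hcnt]
    have hpre' : 16 ≤ glyph.length
        ∨ (glyph.drop 0).any (fun v => decide (PySem.Int.band v 0xFF ≠ 0)) = true := by
      rcases hpre with h | h | h
      · exact absurd h hcnt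
      · exact Or.inl h
      · right; simpa using h
    have hs := scanA_scan glyph 16 0 rfl hpre'
    have hslice : PySem.List.slice glyph none (some 16) = glyph.take 16 := by
      have h0 := PySem.List.slice_to glyph (show (0:Int) ≤ 16 by norm_num)
      simpa using h0
    simp only [Nat.cast_zero, List.drop_zero] at hs
    rw [hslice]
    exact hs
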